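-- pv_equiv track=rewrite | github.com/1311-hack/GFG-POTD-Solutions | Smallest Subset with Greater Sum (15-0902022).py | minSubset
-- ===== SOURCE A (Python) =====
-- def minSubset(A,N):
--     A.sort(reverse=True)
--     all_sum = sum(A)
--     upsum, count = 0, 0
--     for i in range(N):
--         all_sum -= A[i]
--         upsum += A[i]
--         count += 1
--         if upsum > all_sum:
--             break
--     return count
-- ===== SOURCE B (Python) =====
-- def minSubset(A, N):
--     # No sort: repeatedly extract the maximum from a working copy.
--     # (Does NOT sort A in place like the original; return value only.)
--     total = sum(A)
--     pool = list(A)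
--     p = 0
--     k = 0
--     while k < N and pool:
--         m = max(pool)
--         pool.remove(m)
--         p += m
--         k += 1
--         if 2 * p > total:
--             return k
--     return k
-- ===== Notes on version B (the rewrite author's own statement) =====
-- stated objective: alternative
-- what changed: Drops the sort entirely: instead of sorting descending and scanning a prefix, B repeatedly extracts the maximum of a working copy (max + remove) while keeping one running sum, stopping when it exceeds half the fixed total; it trades the O(n log n) sort for selection, O(k*n) in the number k of elements taken.
-- outside the precondition, e.g. on minSubset([5, -5], 3): A returns 1, B returns 1
import Mathlib
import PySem

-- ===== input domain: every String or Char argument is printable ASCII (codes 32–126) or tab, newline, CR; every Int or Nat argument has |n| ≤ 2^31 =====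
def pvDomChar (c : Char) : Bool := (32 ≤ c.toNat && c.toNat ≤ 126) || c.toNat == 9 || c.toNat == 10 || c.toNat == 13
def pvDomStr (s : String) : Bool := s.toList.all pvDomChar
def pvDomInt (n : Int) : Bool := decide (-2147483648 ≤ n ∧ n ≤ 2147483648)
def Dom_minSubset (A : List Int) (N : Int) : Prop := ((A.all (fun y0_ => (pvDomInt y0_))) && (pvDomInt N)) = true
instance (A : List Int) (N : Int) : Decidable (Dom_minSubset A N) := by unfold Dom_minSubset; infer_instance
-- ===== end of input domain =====

-- B drops the sort entirely: it repeatedly extracts the maximum of a working copy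
-- (max + remove) while keeping one running sum (objective: alternative).
-- A sorts the argument list in place (descending); B does not mutate it: the
-- equivalence proved here is about the return value only.


-- ===== PORT A =====
-- the 'for i in range(N)' loop, transcribed lazily like Python's range (i counts 0,1,…
-- while i < N): state (all_sum, upsum, count); pyGet? none = IndexError (outside Pre_)
def minSubsetGo (As : List Int) (N : Int) (i allSum upsum count : Int) : Int :=
  if i < N then
    match PySem.List.pyGet? As i with
    | none => 0  -- IndexError; excluded by Pre_minSubset
    | some a =>
      if upsum + a > allSum - a then count + 1
      else minSubsetGo As N (i + 1) (allSum - a) (upsum + a) (count + 1)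
  else count
termination_by (N - i).toNat
decreasing_by omega

def minSubset (A : List Int) (N : Int) : Int :=
  let As := PySem.List.sorted A (fun x => x) true
  minSubsetGo As N 0 As.sum 0 0

-- ===== PORT B =====
-- the 'while k < N and pool' loop: state (pool, p, k); m = max(pool), pool.remove(m)
def minSubsetPull (total N : Int) (pool : List Int) (p k : Int) : Int :=
  if k < N ∧ pool ≠ [] then
    match PySem.List.max? pool (fun y => y) with
    | none => k  -- unreachable: pool ≠ []
    | some m =>
      match PySem.List.remove? pool m with
      | none => k  -- unreachable: max(pool) ∈ pool
      | some pool' =>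
        if 2 * (p + m) > total then k + 1
        else minSubsetPull total N pool' (p + m) (k + 1)
  else k
termination_by (N - k).toNat
decreasing_by omega

def minSubset_alt (A : List Int) (N : Int) : Int :=
  minSubsetPull A.sum N A 0 0

-- ===== PRECONDITION & SPEC =====
-- Pre_ excludes N > len(A) with a non-positive total, where A may raise IndexError
-- (the break is data-dependent there); B returns a value on all such inputs.
def Pre_minSubset (A : List Int) (N : Int) : Prop := N ≤ (A.length : Int) ∨ 0 < A.sum
instance (A : List Int) (N : Int) : Decidable (Pre_minSubset A N) := by unfold Pre_minSubset; infer_instance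
def pvWitness_minSubset : List Int × Int := ([3, 1, 2], 3)
def Spec_minSubset (A : List Int) (N : Int) (out : Int) : Prop := out = minSubset_alt A N
instance (A : List Int) (N : Int) (out : Int) : Decidable (Spec_minSubset A N out) := by unfold Spec_minSubset; infer_instance

-- ===== CLAIM (what is proved, stated in full; the proofs are below) =====
def Claim_equal_minSubset : Prop := ∀ (A : List Int) (N : Int), Dom_minSubset A N → Pre_minSubset A N → Spec_minSubset A N (minSubset A N)

-- ===== LEMMAS AND PROOFS =====

-- canonical scan over the descending order: both loops reduce to this
def cScan (total N : Int) (l : List Int) (p k : Int) : Int :=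
  if k < N then
    match l with
    | [] => k
    | x :: r => if 2 * (p + x) > total then k + 1 else cScan total N r (p + x) (k + 1)
  else k
termination_by (N - k).toNat
decreasing_by omega

lemma loopA_eq (As : List Int) (N : Int) :
    ∀ (f : Nat) (k : Int), 0 ≤ k → (N - k).toNat = f →
    (N ≤ (As.length : Int) ∨
      (0 < As.sum ∧ (0 < k → 2 * (As.take k.toNat).sum ≤ As.sum))) →
    minSubsetGo As N k (As.sum - (As.take k.toNat).sum) (As.take k.toNat).sum k
      = cScan As.sum N (As.drop k.toNat) (As.take k.toNat).sum k := by
  intro f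
  induction f with
  | zero =>
    intro k hk0 hf _
    rw [minSubsetGo, if_neg (by omega), cScan.eq_def, if_neg (by omega)]
  | succ f ih =>
    intro k hk0 hf hinv
    have hkN : k < N := by omega
    by_cases hknat : k.toNat < As.length
    · have hget : PySem.List.pyGet? As k = some As[k.toNat] :=
        PySem.List.pyGet?_eq_some_getElem As hk0 (by omega)
      have hdrop : As.drop k.toNat = As[k.toNat] :: As.drop (k.toNat + 1) :=
        List.drop_eq_getElem_cons hknat
      have htake : (As.take (k.toNat + 1)).sum = (As.take k.toNat).sum + As[k.toNat] :=
        List.sum_take_succ As k.toNat hknat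
      rw [minSubsetGo, if_pos hkN, hdrop, cScan.eq_def, if_pos hkN]
      dsimp only
      simp only [hget]
      by_cases h : 2 * ((As.take k.toNat).sum + As[k.toNat]) > As.sum
      · rw [if_pos (by omega), if_pos h]
      · rw [if_neg (by omega), if_neg h]
        have h6 : (k + 1).toNat = k.toNat + 1 := by omega
        have := ih (k + 1) (by omega) (by omega)
          (by
            rcases hinv with hL | ⟨hpos, _⟩
            · exact Or.inl hL
            · exact Or.inr ⟨hpos, fun _ => by rw [h6, htake]; omega⟩)
        rw [h6, htake] at this
        have h5 : As.sum - (As.take k.toNat).sum - As[k.toNat]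
            = As.sum - ((As.take k.toNat).sum + As[k.toNat]) := by ring
        rw [h5]
        exact this
    · -- k has run past the list: impossible inside Pre_ (either N ≤ len,
      -- or the total is positive and the break must already have fired)
      exfalso
      have htk : As.take k.toNat = As := List.take_of_length_le (by omega)
      rcases hinv with hL | ⟨hpos, hle⟩
      · omega
      · by_cases hk : 0 < k
        · have := hle hk
          rw [htk] at this
          omega
        · have hk0' : k = 0 := by omega
          have : As = [] := by
            have : As.length = 0 := by omega
            exact List.eq_nil_of_length_eq_zero this
          rw [this] at hpos
          simp at hpos

lemma loopB_eq (total N : Int) :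
    ∀ (f : Nat) (pool s : List Int) (p k : Int), (N - k).toNat = f →
    pool.Perm s → s.Pairwise (fun a b => b ≤ a) →
    minSubsetPull total N pool p k = cScan total N s p k := by
  intro f
  induction f with
  | zero =>
    intro pool s p k hf hperm hpw
    rw [minSubsetPull, if_neg (by omega), cScan.eq_def, if_neg (by omega)]
  | succ f ih =>
    intro pool s p k hf hperm hpw
    have hkN : k < N := by omega
    match s with
    | [] =>
      have : pool = [] := List.perm_nil.mp hperm
      rw [minSubsetPull, if_neg (by simp [this]), cScan.eq_def, if_pos hkN]
    | x :: r =>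
      have hne : pool ≠ [] := by
        intro h; rw [h] at hperm
        exact (List.cons_ne_nil x r) (List.perm_nil.mp hperm.symm)
      obtain ⟨m, hm⟩ : ∃ m, PySem.List.max? pool (fun y => y) = some m := by
        cases hmax : PySem.List.max? pool (fun y => y) with
        | none => exact absurd ((PySem.List.max?_eq_none_iff pool (fun y => y)).mp hmax) hne
        | some m => exact ⟨m, rfl⟩
      have hmmem : m ∈ pool := PySem.List.max?_mem hm
      have hmax : ∀ y ∈ pool, y ≤ m := fun y hy => PySem.List.max?_isMax hm y hy
      have hxm : x ≤ m := hmax x (hperm.mem_iff.mpr List.mem_cons_self)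
      have hmx : m ≤ x := by
        have hmem2 : m ∈ x :: r := hperm.mem_iff.mp hmmem
        rcases List.mem_cons.mp hmem2 with h' | hmr
        · exact le_of_eq h'
        · exact (List.pairwise_cons.mp hpw).1 m hmr
      have hmex : m = x := le_antisymm hmx hxm
      subst hmex
      have hrem : PySem.List.remove? pool m = some (pool.erase m) :=
        PySem.List.remove?_eq_some_erase pool m hmmem
      have hperm' : (pool.erase m).Perm r := by
        have := hperm.erase m
        simpa [List.erase_cons_head] using this
      rw [minSubsetPull, if_pos ⟨hkN, hne⟩]
      simp only [hm, hrem]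
      rw [cScan.eq_def, if_pos hkN]
      dsimp only
      by_cases h : 2 * (p + m) > total
      · rw [if_pos h, if_pos h]
      · rw [if_neg h, if_neg h]
        exact ih (pool.erase m) r (p + m) (k + 1) (by omega) hperm'
          (List.pairwise_cons.mp hpw).2

-- ===== VERDICT (by name: the statement is the Claim_ definition above) =====
theorem minSubset_spec : Claim_equal_minSubset := by
  intro A N _ hPre
  unfold Spec_minSubset minSubset minSubset_alt
  set s := PySem.List.sorted A (fun x => x) true with hs
  have hperm : s.Perm A := PySem.List.sorted_perm A (fun x => x) true
  have hlen : s.length = A.length := PySem.List.length_sorted A (fun x => x) true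
  have hsum : A.sum = s.sum := (hperm.sum_eq).symm
  have hA := loopA_eq s N (N - 0).toNat 0 le_rfl rfl
    (by
      rcases hPre with hL | hpos
      · exact Or.inl (by rw [hlen]; exact hL)
      · exact Or.inr ⟨by rw [← hsum]; exact hpos, fun h => absurd h (by omega)⟩)
  have hB := loopB_eq s.sum N (N - 0).toNat A s 0 0 rfl hperm.symm
    (PySem.List.sorted_pairwise_rev A (fun x => x))
  simp only [Int.toNat_zero, List.take_zero, List.sum_nil, sub_zero, List.drop_zero] at hA
  rw [hA, hsum, hB]
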